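-- pv_equiv track=rewrite | github.com/vzguille/scheduler_src | enum_mod.py | find_combinations_target
-- ===== SOURCE A (Python) =====
-- def find_combinations_target(target):
--     result = []
--     for i in range(1, target + 1):
--         for j in range(i, target + 1):
--             for k in range(j, target + 1):
--                 if i * j * k == target:
--                     result.append((i, j, k))
--     return result
-- ===== SOURCE B (Python) =====
-- def find_combinations_target(target):
--     # Enumerate only divisors: i up to cube root, j over divisors of target//i up to its square root.
--     result = []
--     for i in range(1, target + 1):
--         if i * i * i > target:
--             break
--         if target % i == 0:
--             rem = target // i
--             for j in range(i, target + 1):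
--                 if j * j > rem:
--                     break
--                 if rem % j == 0:
--                     result.append((i, j, rem // j))
--     return result
-- ===== Notes on version B (the rewrite author's own statement) =====
-- stated objective: faster
-- what changed: Replaces the triple nested scan over all of 1..target by divisor enumeration: i runs only up to the cube root of target, and for each divisor i, j runs over divisors of target//i up to its square root with k computed as rem//j.
import Mathlib
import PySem

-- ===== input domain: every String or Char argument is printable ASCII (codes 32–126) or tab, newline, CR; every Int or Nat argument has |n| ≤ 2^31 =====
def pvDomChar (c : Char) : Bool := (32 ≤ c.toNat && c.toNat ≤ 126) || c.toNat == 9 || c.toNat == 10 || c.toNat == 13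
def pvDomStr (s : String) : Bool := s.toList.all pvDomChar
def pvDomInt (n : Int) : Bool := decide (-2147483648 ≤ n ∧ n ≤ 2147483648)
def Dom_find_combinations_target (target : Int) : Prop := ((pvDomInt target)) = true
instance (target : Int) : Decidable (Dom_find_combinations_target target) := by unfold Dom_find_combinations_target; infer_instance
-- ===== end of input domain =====

-- B replaces A's triple scan over 1..target by divisor enumeration (i up to the cube
-- root, j over divisors of target//i up to its square root, k computed directly);
-- objective: faster (asymptotically fewer iterations).

-- ===== PORT A =====
def find_combinations_target (target : Int) : List (List Int) :=
  (PySem.List.pyRange 1 (target + 1) 1).foldl (fun result i =>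
    (PySem.List.pyRange i (target + 1) 1).foldl (fun result j =>
      (PySem.List.pyRange j (target + 1) 1).foldl (fun result k =>
        if i * j * k == target then result ++ [[i, j, k]] else result) result) result) []

-- ===== PORT B =====
-- inner 'for j in range(i, target+1): if j*j > rem: break; …' over the remaining j-values
def fctAltJ (rem i : Int) : List Int → List (List Int)
  | [] => []
  | j :: rest =>
    if j * j > rem then []
    else (if PySem.Int.mod rem j == 0 then [[i, j, PySem.Int.floordiv rem j]] else []) ++
         fctAltJ rem i rest

-- outer 'for i in range(1, target+1): if i*i*i > target: break; …'
def fctAltI (target : Int) : List Int → List (List Int)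
  | [] => []
  | i :: rest =>
    if i * i * i > target then []
    else (if PySem.Int.mod target i == 0 then
            fctAltJ (PySem.Int.floordiv target i) i (PySem.List.pyRange i (target + 1) 1)
          else []) ++ fctAltI target rest

def find_combinations_target_alt (target : Int) : List (List Int) :=
  fctAltI target (PySem.List.pyRange 1 (target + 1) 1)

-- ===== PRECONDITION & SPEC =====
def Spec_find_combinations_target (target : Int) (out : List (List Int)) : Prop := out = find_combinations_target_alt target
instance (target : Int) (out : List (List Int)) : Decidable (Spec_find_combinations_target target out) := by unfold Spec_find_combinations_target; infer_instance

-- ===== CLAIM (what is proved, stated in full; the proofs are below) =====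
def Claim_equal_find_combinations_target : Prop := ∀ (target : Int), Dom_find_combinations_target target → Spec_find_combinations_target target (find_combinations_target target)

-- ===== LEMMAS AND PROOFS =====

-- A as a triple flatMap/filter
lemma fct_A_flat (t : Int) :
    find_combinations_target t =
      (PySem.List.pyRange 1 (t + 1) 1).flatMap (fun i =>
        (PySem.List.pyRange i (t + 1) 1).flatMap (fun j =>
          ((PySem.List.pyRange j (t + 1) 1).filter (fun k => i * j * k == t)).map
            (fun k => [i, j, k]))) := by
  unfold find_combinations_target
  simp only [PySem.List.foldl_append_if, PySem.List.foldl_append_eq_flatMap, List.nil_append]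

-- break-truncated inner loop = guarded flatMap, on an ascending list of positives
lemma fctAltJ_flat (rem i : Int) (l : List Int) (hpos : ∀ x ∈ l, 1 ≤ x)
    (hsort : l.Pairwise (· ≤ ·)) :
    fctAltJ rem i l = l.flatMap (fun j =>
      if j * j > rem then []
      else if PySem.Int.mod rem j == 0 then [[i, j, PySem.Int.floordiv rem j]] else []) := by
  induction l with
  | nil => simp [fctAltJ]
  | cons j rest ih =>
    rw [List.pairwise_cons] at hsort
    have hj1 : (1 : Int) ≤ j := hpos j (List.mem_cons_self ..)
    by_cases h : j * j > rem
    · rw [fctAltJ, if_pos h]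
      symm
      apply List.flatMap_eq_nil_iff.mpr
      intro x hx
      have hjx : j ≤ x := by
        rcases List.mem_cons.mp hx with rfl | hx'
        · exact le_refl x
        · exact hsort.1 x hx'
      have : x * x > rem := by nlinarith
      simp [this]
    · rw [fctAltJ, if_neg h, List.flatMap_cons, if_neg h,
        ih (fun x hx => hpos x (List.mem_cons_of_mem _ hx)) hsort.2]

-- break-truncated outer loop = guarded flatMap
lemma fctAltI_flat (t : Int) (l : List Int) (hpos : ∀ x ∈ l, 1 ≤ x)
    (hsort : l.Pairwise (· ≤ ·)) :
    fctAltI t l = l.flatMap (fun i =>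
      if i * i * i > t then []
      else if PySem.Int.mod t i == 0 then
        fctAltJ (PySem.Int.floordiv t i) i (PySem.List.pyRange i (t + 1) 1)
      else []) := by
  induction l with
  | nil => simp [fctAltI]
  | cons i rest ih =>
    rw [List.pairwise_cons] at hsort
    have hi1 : (1 : Int) ≤ i := hpos i (List.mem_cons_self ..)
    by_cases h : i * i * i > t
    · rw [fctAltI, if_pos h]
      symm
      apply List.flatMap_eq_nil_iff.mpr
      intro x hx
      have hix : i ≤ x := by
        rcases List.mem_cons.mp hx with rfl | hx'
        · exact le_refl x
        · exact hsort.1 x hx'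
      have hsq : i * i ≤ x * x := by nlinarith
      have : x * x * x > t := by nlinarith
      simp [this]
    · rw [fctAltI, if_neg h, List.flatMap_cons, if_neg h,
        ih (fun x hx => hpos x (List.mem_cons_of_mem _ hx)) hsort.2]

-- per-(i,j) agreement
lemma fct_per_j (t i rem j : Int) (hi : 1 ≤ i) (hrem : i * rem = t)
    (hj : i ≤ j) (hjt : j ≤ t) :
    ((PySem.List.pyRange j (t + 1) 1).filter (fun k => i * j * k == t)).map
      (fun k => [i, j, k]) =
    (if j * j > rem then []
     else if PySem.Int.mod rem j == 0 then [[i, j, PySem.Int.floordiv rem j]] else []) := by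
  have hj1 : (1 : Int) ≤ j := le_trans hi hj
  have hi0 : i ≠ 0 := by omega
  have ht1 : (1 : Int) ≤ t := le_trans hj1 hjt
  have hrem1 : (1 : Int) ≤ rem := by nlinarith
  by_cases h : j * j > rem
  · rw [if_pos h]
    have hfil : (PySem.List.pyRange j (t + 1) 1).filter (fun k => i * j * k == t) = [] := by
      apply List.filter_eq_nil_iff.mpr
      intro k hk
      have hjk : j ≤ k := (PySem.List.mem_pyRange_one.mp hk).1
      simp only [beq_iff_eq]
      intro heq
      have hjk' : j * k = rem := by
        apply mul_left_cancel₀ hi0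
        rw [hrem, ← heq]; ring
      nlinarith
    rw [hfil, List.map_nil]
  · rw [if_neg h]
    rw [not_lt] at h
    by_cases hd : j ∣ rem
    · obtain ⟨c, hc⟩ := hd
      have hjc : j * c = rem := hc.symm
      have hcj : j ≤ c := by nlinarith
      have hct : c ≤ t := by nlinarith
      have hfd : PySem.Int.floordiv rem j = c := by
        rw [PySem.Int.floordiv_eq_ediv_of_pos (by omega), hc,
          Int.mul_ediv_cancel_left _ (by omega)]
      have hmod : (PySem.Int.mod rem j == 0) = true := by
        simp [PySem.Int.mod_eq_zero_iff_dvd]; exact ⟨c, hc⟩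
      rw [hmod, if_pos rfl, hfd]
      have hcong : (PySem.List.pyRange j (t + 1) 1).filter (fun k => i * j * k == t) =
          (PySem.List.pyRange j (t + 1) 1).filter (fun k => k == c) := by
        apply List.filter_congr
        intro k hk
        rw [Bool.eq_iff_iff]
        simp only [beq_iff_eq]
        constructor
        · intro heq
          have : j * k = j * c := by
            apply mul_left_cancel₀ hi0
            linear_combination heq - hrem + i * hc
          exact mul_left_cancel₀ (by omega : j ≠ 0) this
        · rintro rfl
          linear_combination hrem - i * hc
      rw [hcong, List.filter_beq,
        List.count_eq_one_of_mem (PySem.List.nodup_pyRange_one j (t + 1))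
          (PySem.List.mem_pyRange_one.mpr ⟨hcj, by omega⟩)]
      rfl
    · have hmod : (PySem.Int.mod rem j == 0) = false := by
        simp [PySem.Int.mod_eq_zero_iff_dvd]; exact hd
      rw [hmod, if_neg Bool.false_ne_true]
      have hfil : (PySem.List.pyRange j (t + 1) 1).filter (fun k => i * j * k == t) = [] := by
        apply List.filter_eq_nil_iff.mpr
        intro k hk
        simp only [beq_iff_eq]
        intro heq
        exact hd ⟨k, by
          apply mul_left_cancel₀ hi0
          rw [hrem, ← heq]; ring⟩
      rw [hfil, List.map_nil]

-- per-i agreement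
lemma fct_per_i (t i : Int) (hi : 1 ≤ i) (_hit : i ≤ t) :
    (PySem.List.pyRange i (t + 1) 1).flatMap (fun j =>
      ((PySem.List.pyRange j (t + 1) 1).filter (fun k => i * j * k == t)).map
        (fun k => [i, j, k])) =
    (if i * i * i > t then []
     else if PySem.Int.mod t i == 0 then
       fctAltJ (PySem.Int.floordiv t i) i (PySem.List.pyRange i (t + 1) 1)
     else []) := by
  by_cases h : i * i * i > t
  · rw [if_pos h]
    apply List.flatMap_eq_nil_iff.mpr
    intro j hj
    have hij : i ≤ j := (PySem.List.mem_pyRange_one.mp hj).1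
    have hfil : (PySem.List.pyRange j (t + 1) 1).filter (fun k => i * j * k == t) = [] := by
      apply List.filter_eq_nil_iff.mpr
      intro k hk
      have hjk : j ≤ k := (PySem.List.mem_pyRange_one.mp hk).1
      simp only [beq_iff_eq]
      intro heq
      have hsq : i * i ≤ i * j := by nlinarith
      have hcube : i * i * i ≤ i * j * k := by nlinarith
      linarith
    rw [hfil, List.map_nil]
  · rw [if_neg h]
    rw [not_lt] at h
    by_cases hd : i ∣ t
    · have hmod : (PySem.Int.mod t i == 0) = true := by
        simp [PySem.Int.mod_eq_zero_iff_dvd]; exact hd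
      rw [hmod, if_pos rfl]
      have hrem : i * PySem.Int.floordiv t i = t := by
        rw [PySem.Int.floordiv_eq_ediv_of_pos (by omega)]
        exact Int.mul_ediv_cancel' hd
      rw [fctAltJ_flat _ _ _ (fun x hx => le_trans hi (PySem.List.mem_pyRange_one.mp hx).1)
        ((PySem.List.pairwise_lt_pyRange_one i (t + 1)).imp le_of_lt)]
      apply List.flatMap_congr
      intro j hj
      obtain ⟨h1, h2⟩ := PySem.List.mem_pyRange_one.mp hj
      exact fct_per_j t i _ j hi hrem h1 (by omega)
    · have hmod : (PySem.Int.mod t i == 0) = false := by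
        simp [PySem.Int.mod_eq_zero_iff_dvd]; exact hd
      rw [hmod, if_neg Bool.false_ne_true]
      apply List.flatMap_eq_nil_iff.mpr
      intro j hj
      have hfil : (PySem.List.pyRange j (t + 1) 1).filter (fun k => i * j * k == t) = [] := by
        apply List.filter_eq_nil_iff.mpr
        intro k hk
        simp only [beq_iff_eq]
        intro heq
        exact hd ⟨j * k, by rw [← heq]; ring⟩
      rw [hfil, List.map_nil]

-- ===== VERDICT (by name: the statement is the Claim_ definition above) =====
theorem find_combinations_target_spec : Claim_equal_find_combinations_target := by
  intro t _
  unfold Spec_find_combinations_target find_combinations_target_alt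
  rw [fct_A_flat,
      fctAltI_flat t _ (fun x hx => (PySem.List.mem_pyRange_one.mp hx).1)
        ((PySem.List.pairwise_lt_pyRange_one 1 (t + 1)).imp le_of_lt)]
  apply List.flatMap_congr
  intro i hi
  obtain ⟨h1, h2⟩ := PySem.List.mem_pyRange_one.mp hi
  exact fct_per_i t i h1 (by omega)
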